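-- pv_equiv track=rewrite | github.com/JackCharlesZhang/tamp_physical_improvisation | src/tamp_improv/analysis/ppo_distance.py | generate_all_cell_pairs_at_distance
-- ===== SOURCE A (Python) =====
-- def calculate_manhattan_distance(
--     cell1: tuple[int, int], cell2: tuple[int, int]
-- ) -> int:
--     """Calculate Manhattan distance between two cells.
--
--     Args:
--         cell1: First cell coordinates (row, col)
--         cell2: Second cell coordinates (row, col)
--
--     Returns:
--         Manhattan distance between cells
--     """
--     return abs(cell1[0] - cell2[0]) + abs(cell1[1] - cell2[1])
--
-- def generate_all_cell_pairs_at_distance(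
--     num_cells: int, distance: int
-- ) -> list[tuple[tuple[int, int], tuple[int, int]]]:
--     """Generate all valid cell pairs at a specific Manhattan distance.
--
--     Args:
--         num_cells: Grid dimension (C×C grid)
--         distance: Target Manhattan distance
--
--     Returns:
--         List of (initial_cell, goal_cell) tuples at the specified distance
--     """
--     pairs = []
--     for start_row in range(num_cells):
--         for start_col in range(num_cells):
--             for goal_row in range(num_cells):
--                 for goal_col in range(num_cells):
--                     start_cell = (start_row, start_col)
--                     goal_cell = (goal_row, goal_col)
--                     if calculate_manhattan_distance(start_cell, goal_cell) == distance:
--                         pairs.append((start_cell, goal_cell))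
--     return pairs
-- ===== SOURCE B (Python) =====
-- def generate_all_cell_pairs_at_distance(num_cells, distance):
--     """Same pairs in the same order, but the goal columns are computed directly
--     (at most two per (start, goal_row)) instead of scanned."""
--     pairs = []
--     for start_row in range(num_cells):
--         for start_col in range(num_cells):
--             for goal_row in range(num_cells):
--                 rem = distance - abs(start_row - goal_row)
--                 if rem < 0:
--                     continue
--                 lo = start_col - rem
--                 if 0 <= lo < num_cells:
--                     pairs.append(((start_row, start_col), (goal_row, lo)))
--                 hi = start_col + rem
--                 if rem != 0 and 0 <= hi < num_cells:
--                     pairs.append(((start_row, start_col), (goal_row, hi)))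
--     return pairs
-- ===== Notes on version B (the rewrite author's own statement) =====
-- stated objective: faster
-- what changed: The innermost scan over all goal columns is replaced by direct computation of the at-most-two goal columns start_col±(distance-|start_row-goal_row|), dropping the cost from O(C^4) to O(C^3).
import Mathlib
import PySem

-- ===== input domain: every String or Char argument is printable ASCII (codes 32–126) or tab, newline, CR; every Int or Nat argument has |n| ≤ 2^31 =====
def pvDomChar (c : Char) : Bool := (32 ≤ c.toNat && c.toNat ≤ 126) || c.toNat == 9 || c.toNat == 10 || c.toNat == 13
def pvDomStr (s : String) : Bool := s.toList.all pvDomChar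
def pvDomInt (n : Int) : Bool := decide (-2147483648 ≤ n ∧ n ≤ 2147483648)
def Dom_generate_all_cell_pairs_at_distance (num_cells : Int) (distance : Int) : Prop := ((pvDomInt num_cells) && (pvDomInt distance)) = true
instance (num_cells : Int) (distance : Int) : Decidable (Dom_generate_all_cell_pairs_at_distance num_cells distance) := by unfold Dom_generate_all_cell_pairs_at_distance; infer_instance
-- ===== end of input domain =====

-- B replaces A's innermost scan over all goal columns by direct computation of the at-most-two
-- valid goal columns start_col ± (distance - |start_row - goal_row|): faster (O(C^3) vs O(C^4)).

-- ===== PORT A =====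
def calculate_manhattan_distance (cell1 : Int × Int) (cell2 : Int × Int) : Int :=
  |cell1.1 - cell2.1| + |cell1.2 - cell2.2|

def generate_all_cell_pairs_at_distance (num_cells : Int) (distance : Int) :
    List ((Int × Int) × (Int × Int)) :=
  (PySem.List.pyRange 0 num_cells 1).foldl (fun pairs start_row =>
    (PySem.List.pyRange 0 num_cells 1).foldl (fun pairs start_col =>
      (PySem.List.pyRange 0 num_cells 1).foldl (fun pairs goal_row =>
        (PySem.List.pyRange 0 num_cells 1).foldl (fun pairs goal_col =>
          if calculate_manhattan_distance (start_row, start_col) (goal_row, goal_col) == distance then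
            pairs ++ [((start_row, start_col), (goal_row, goal_col))]
          else pairs) pairs) pairs) pairs) []

-- ===== PORT B =====
def generate_all_cell_pairs_at_distance_alt (num_cells : Int) (distance : Int) :
    List ((Int × Int) × (Int × Int)) :=
  (PySem.List.pyRange 0 num_cells 1).foldl (fun pairs start_row =>
    (PySem.List.pyRange 0 num_cells 1).foldl (fun pairs start_col =>
      (PySem.List.pyRange 0 num_cells 1).foldl (fun pairs goal_row =>
        let rem := distance - |start_row - goal_row|
        if rem < 0 then pairs
        else
          let lo := start_col - rem
          let pairs1 :=
            if 0 ≤ lo ∧ lo < num_cells then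
              pairs ++ [((start_row, start_col), (goal_row, lo))]
            else pairs
          let hi := start_col + rem
          if rem ≠ 0 ∧ 0 ≤ hi ∧ hi < num_cells then
            pairs1 ++ [((start_row, start_col), (goal_row, hi))]
          else pairs1) pairs) pairs) []

-- ===== PRECONDITION & SPEC =====
def Spec_generate_all_cell_pairs_at_distance (num_cells : Int) (distance : Int) (out : List ((Int × Int) × (Int × Int))) : Prop := out = generate_all_cell_pairs_at_distance_alt num_cells distance
instance (num_cells : Int) (distance : Int) (out : List ((Int × Int) × (Int × Int))) : Decidable (Spec_generate_all_cell_pairs_at_distance num_cells distance out) := by unfold Spec_generate_all_cell_pairs_at_distance; infer_instance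

-- ===== CLAIM (what is proved, stated in full; the proofs are below) =====
def Claim_equal_generate_all_cell_pairs_at_distance : Prop := ∀ (num_cells : Int) (distance : Int), Dom_generate_all_cell_pairs_at_distance num_cells distance → Spec_generate_all_cell_pairs_at_distance num_cells distance (generate_all_cell_pairs_at_distance num_cells distance)

-- ===== LEMMAS AND PROOFS =====

-- the two candidate goal columns, filtered out of range(m)
lemma filter_range_two (m : Nat) (c rem : Int) (hrem : 0 ≤ rem) :
    (PySem.List.pyRange 0 (m : Int) 1).filter (fun gc => gc == c - rem || gc == c + rem) =
      (if 0 ≤ c - rem ∧ c - rem < (m : Int) then [c - rem] else []) ++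
      (if rem ≠ 0 ∧ 0 ≤ c + rem ∧ c + rem < (m : Int) then [c + rem] else []) := by
  induction m with
  | zero =>
      rw [PySem.List.pyRange_one_eq_nil (by omega)]
      rw [if_neg (by omega), if_neg (by omega)]
      rfl
  | succ k ih =>
      have hcast : ((k + 1 : Nat) : Int) = (k : Int) + 1 := by push_cast; ring
      rw [hcast, PySem.List.pyRange_one_succ_right (by positivity), List.filter_append, ih]
      simp only [List.filter_cons, List.filter_nil, Bool.or_eq_true, beq_iff_eq]
      split_ifs <;> first
        | (simp; omega)
        | simp

lemma filter_pyRange_two (n c rem : Int) (hrem : 0 ≤ rem) :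
    (PySem.List.pyRange 0 n 1).filter (fun gc => gc == c - rem || gc == c + rem) =
      (if 0 ≤ c - rem ∧ c - rem < n then [c - rem] else []) ++
      (if rem ≠ 0 ∧ 0 ≤ c + rem ∧ c + rem < n then [c + rem] else []) := by
  by_cases hn : n ≤ 0
  · rw [PySem.List.pyRange_one_eq_nil (by omega), if_neg (by omega), if_neg (by omega)]
    rfl
  · have : n = ((n.toNat : Nat) : Int) := by omega
    rw [this]
    exact filter_range_two n.toNat c rem hrem

-- the innermost loop of A equals the direct computation in B, for any start column
lemma inner_loop_eq (n d sr sc gr : Int) (acc : List ((Int × Int) × (Int × Int))) :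
    (PySem.List.pyRange 0 n 1).foldl (fun pairs gc =>
        if calculate_manhattan_distance (sr, sc) (gr, gc) == d then
          pairs ++ [((sr, sc), (gr, gc))]
        else pairs) acc =
      (let rem := d - |sr - gr|
       if rem < 0 then acc
       else
         let lo := sc - rem
         let pairs1 := if 0 ≤ lo ∧ lo < n then acc ++ [((sr, sc), (gr, lo))] else acc
         let hi := sc + rem
         if rem ≠ 0 ∧ 0 ≤ hi ∧ hi < n then pairs1 ++ [((sr, sc), (gr, hi))] else pairs1) := by
  simp only []
  set rem := d - |sr - gr| with hrem
  rw [PySem.List.foldl_append_if]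
  by_cases h : rem < 0
  · rw [if_pos h]
    have : (PySem.List.pyRange 0 n 1).filter
        (fun gc => calculate_manhattan_distance (sr, sc) (gr, gc) == d) = [] := by
      apply List.filter_eq_nil_iff.mpr
      intro gc _
      simp only [calculate_manhattan_distance, beq_iff_eq]
      have h1 : 0 ≤ |sc - gc| := abs_nonneg _
      omega
    rw [this]; simp
  · have h : 0 ≤ rem := by omega
    rw [if_neg (by omega)]
    have hfc : (PySem.List.pyRange 0 n 1).filter
        (fun gc => calculate_manhattan_distance (sr, sc) (gr, gc) == d) =
        (PySem.List.pyRange 0 n 1).filter (fun gc => gc == sc - rem || gc == sc + rem) := by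
      apply List.filter_congr
      intro gc _
      simp only [calculate_manhattan_distance]
      rw [Bool.eq_iff_iff]
      simp only [Bool.or_eq_true, beq_iff_eq]
      constructor
      · intro hd
        have : |sc - gc| = rem := by omega
        rcases abs_eq h |>.mp this with h' | h' <;> omega
      · rintro (h' | h')
        · subst h'; rw [show sc - (sc - rem) = rem by ring, abs_of_nonneg h]; omega
        · subst h'; rw [show sc - (sc + rem) = -rem by ring, abs_neg, abs_of_nonneg h]; omega
    rw [hfc, filter_pyRange_two n sc rem h]
    split_ifs <;> simp

-- ===== VERDICT (by name: the statement is the Claim_ definition above) =====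
theorem generate_all_cell_pairs_at_distance_spec : Claim_equal_generate_all_cell_pairs_at_distance := by
  intro n d _
  unfold Spec_generate_all_cell_pairs_at_distance
  unfold generate_all_cell_pairs_at_distance generate_all_cell_pairs_at_distance_alt
  apply PySem.List.foldl_congr_mem
  intro acc sr _
  apply PySem.List.foldl_congr_mem
  intro acc sc _
  apply PySem.List.foldl_congr_mem
  intro acc gr _
  exact inner_loop_eq n d sr sc gr acc
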